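-- pv_equiv track=rewrite | github.com/FoNDUE-HTR/ScrabbleGAN | scrabblegan_pipeline.py | _map_gt_to_cuts
-- ===== SOURCE A (Python) =====
-- def _levenshtein_align(gt: str, ocr: str):
--     m, n = len(gt), len(ocr)
--     dp = [[0] * (n + 1) for _ in range(m + 1)]
--     for i in range(m + 1): dp[i][0] = i
--     for j in range(n + 1): dp[0][j] = j
--     for i in range(1, m + 1):
--         for j in range(1, n + 1):
--             dp[i][j] = dp[i-1][j-1] if gt[i-1] == ocr[j-1] \
--                 else 1 + min(dp[i-1][j], dp[i][j-1], dp[i-1][j-1])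
--     align_gt, align_ocr = [], []
--     i, j = m, n
--     while i > 0 or j > 0:
--         if i > 0 and j > 0 and dp[i][j] == dp[i-1][j-1] + (0 if gt[i-1] == ocr[j-1] else 1):
--             align_gt.append(gt[i-1]); align_ocr.append(ocr[j-1]); i -= 1; j -= 1
--         elif i > 0 and dp[i][j] == dp[i-1][j] + 1:
--             align_gt.append(gt[i-1]); align_ocr.append(None); i -= 1
--         else:
--             align_gt.append(None); align_ocr.append(ocr[j-1]); j -= 1
--     align_gt.reverse(); align_ocr.reverse()
--     return align_gt, align_ocr
--
-- def _map_gt_to_cuts(gt: str, ocr: str, cuts: list) -> list: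
--     align_gt, align_ocr = _levenshtein_align(gt, ocr)
--     ocr_idx = 0
--     gt_cuts = []
--     last_cut = cuts[0] if cuts else [[0,0],[0,0],[0,0],[0,0]]
--     for ag, ao in zip(align_gt, align_ocr):
--         if ag is None:
--             if ocr_idx < len(cuts): last_cut = cuts[ocr_idx]
--             ocr_idx += 1
--         elif ao is None:
--             gt_cuts.append(last_cut)
--         else:
--             if ocr_idx < len(cuts): last_cut = cuts[ocr_idx]
--             gt_cuts.append(last_cut)
--             ocr_idx += 1
--     return gt_cuts
-- ===== SOURCE B (Python) =====
-- def _map_gt_to_cuts(gt: str, ocr: str, cuts: list) -> list: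
--     # Backpointer DP: record a direction code per cell during the fill
--     # (same diag-then-up-then-left priority as a recomputed traceback),
--     # then walk the pointers from (m, n) emitting each gt char's cut
--     # directly via a closed-form index -- no alignment lists, no
--     # last_cut/ocr_idx state machine.
--     m, n = len(gt), len(ocr)
--     k = len(cuts)
--     default = [[0, 0], [0, 0], [0, 0], [0, 0]]
--
--     def cut_at(j):  # cut for a gt char emitted at column j of the traceback
--         return cuts[min(max(j - 1, 0), k - 1)] if k else default
--
--     dp = [[0] * (n + 1) for _ in range(m + 1)]
--     dirs = [[0] * (n + 1) for _ in range(m + 1)]  # 0=diag, 1=up, 2=left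
--     for i in range(m + 1):
--         dp[i][0] = i
--     for j in range(n + 1):
--         dp[0][j] = j
--     for i in range(1, m + 1):
--         for j in range(1, n + 1):
--             if gt[i - 1] == ocr[j - 1]:
--                 dp[i][j] = dp[i - 1][j - 1]
--                 dirs[i][j] = 0
--             else:
--                 v = 1 + min(dp[i - 1][j], dp[i][j - 1], dp[i - 1][j - 1])
--                 dp[i][j] = v
--                 dirs[i][j] = 0 if v == dp[i - 1][j - 1] + 1 else (1 if v == dp[i - 1][j] + 1 else 2)
--
--     out = []
--     i, j = m, n
--     while i > 0 or j > 0: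
--         d = dirs[i][j] if (i > 0 and j > 0) else (1 if j == 0 else 2)
--         if d == 0:
--             out.append(cut_at(j)); i -= 1; j -= 1
--         elif d == 1:
--             out.append(cut_at(j)); i -= 1
--         else:
--             j -= 1
--     out.reverse()
--     return out
-- ===== Notes on version B (the rewrite author's own statement) =====
-- stated objective: alternative
-- what changed: B records a backpointer direction code per cell during the same O(m*n) DP fill and reconstructs the answer by walking the stored pointers from (m,n), emitting each gt character's cut directly via a closed-form index min(max(j-1,0), len(cuts)-1); A instead re-tests dp values during the backtrack, builds two alignment lists, and then runs a separate forward mapping pass with ocr_idx/last_cut state.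
import Mathlib
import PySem

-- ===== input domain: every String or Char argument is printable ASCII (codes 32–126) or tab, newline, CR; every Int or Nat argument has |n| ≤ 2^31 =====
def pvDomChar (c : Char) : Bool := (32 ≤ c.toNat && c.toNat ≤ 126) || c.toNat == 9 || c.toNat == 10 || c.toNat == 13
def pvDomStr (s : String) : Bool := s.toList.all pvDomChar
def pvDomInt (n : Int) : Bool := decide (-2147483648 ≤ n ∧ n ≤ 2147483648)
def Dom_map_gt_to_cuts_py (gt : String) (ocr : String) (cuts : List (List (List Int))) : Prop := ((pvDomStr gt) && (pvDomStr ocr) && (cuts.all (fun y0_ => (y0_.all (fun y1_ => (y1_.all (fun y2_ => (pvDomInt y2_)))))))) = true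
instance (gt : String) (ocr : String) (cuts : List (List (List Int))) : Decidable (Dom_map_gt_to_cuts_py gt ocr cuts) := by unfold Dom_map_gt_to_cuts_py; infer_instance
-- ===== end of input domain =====

-- B replaces A's dp-recomputing traceback + align-list/last_cut mapping pass by a
-- backpointer table recorded during the same DP fill and a closed-form cut index
-- emitted directly during the pointer walk (objective: alternative structure).

-- shared low-level primitives (Python list-of-lists indexing/assignment)
def pvDefaultCut : List (List Int) := [[0,0],[0,0],[0,0],[0,0]]
def pvGet2 (t : List (List Int)) (i j : Nat) : Int := (t.getD i []).getD j 0
def pvSet2 (t : List (List Int)) (i j : Nat) (v : Int) : List (List Int) :=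
  t.set i ((t.getD i []).set j v)

-- ===== PORT A =====
-- dp fill of _levenshtein_align
def pvFillA (g o : List Char) : List (List Int) :=
  let m := g.length
  let n := o.length
  let dp0 : List (List Int) := List.replicate (m+1) (List.replicate (n+1) 0)
  let dp1 := (List.range (m+1)).foldl (fun t i => pvSet2 t i 0 (Int.ofNat i)) dp0
  let dp2 := (List.range (n+1)).foldl (fun t j => pvSet2 t 0 j (Int.ofNat j)) dp1
  (List.range m).foldl (fun t a =>
    (List.range n).foldl (fun t b =>
      let i := a+1
      let j := b+1
      pvSet2 t i j
        (if g.getD (i-1) ' ' = o.getD (j-1) ' ' then pvGet2 t (i-1) (j-1)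
         else 1 + min (min (pvGet2 t (i-1) j) (pvGet2 t i (j-1))) (pvGet2 t (i-1) (j-1)))) t) dp2

-- the while-loop backtrack of _levenshtein_align (fuel = i+j bounds the loop)
def pvTbA (g o : List Char) (dp : List (List Int)) :
    Nat → Nat → Nat → List (Option Char) → List (Option Char) →
    List (Option Char) × List (Option Char)
  | 0, _, _, ag, ao => (ag, ao)
  | fuel+1, i, j, ag, ao =>
    if 0 < i ∨ 0 < j then
      if 0 < i ∧ 0 < j ∧ pvGet2 dp i j = pvGet2 dp (i-1) (j-1) +
          (if g.getD (i-1) ' ' = o.getD (j-1) ' ' then 0 else 1) then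
        pvTbA g o dp fuel (i-1) (j-1) (ag ++ [some (g.getD (i-1) ' ')]) (ao ++ [some (o.getD (j-1) ' ')])
      else if 0 < i ∧ pvGet2 dp i j = pvGet2 dp (i-1) j + 1 then
        pvTbA g o dp fuel (i-1) j (ag ++ [some (g.getD (i-1) ' ')]) (ao ++ [none])
      else
        pvTbA g o dp fuel i (j-1) (ag ++ [none]) (ao ++ [some (o.getD (j-1) ' ')])
    else (ag, ao)

-- one step of _map_gt_to_cuts's for-loop; state = (ocr_idx, last_cut, gt_cuts)
def pvMapStep (cuts : List (List (List Int)))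
    (s : Nat × List (List Int) × List (List (List Int)))
    (p : Option Char × Option Char) : Nat × List (List Int) × List (List (List Int)) :=
  match p with
  | (none, _) => (s.1 + 1, (if s.1 < cuts.length then cuts.getD s.1 [] else s.2.1), s.2.2)
  | (some _, none) => (s.1, s.2.1, s.2.2 ++ [s.2.1])
  | (some _, some _) =>
      let lc := if s.1 < cuts.length then cuts.getD s.1 [] else s.2.1
      (s.1 + 1, lc, s.2.2 ++ [lc])

def map_gt_to_cuts_py (gt : String) (ocr : String) (cuts : List (List (List Int))) : List (List (List Int)) :=
  let g := gt.toList
  let o := ocr.toList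
  let dp := pvFillA g o
  let p := pvTbA g o dp (g.length + o.length) g.length o.length [] []
  let pairs := List.zip p.1.reverse p.2.reverse
  let init := if cuts.isEmpty then pvDefaultCut else cuts.getD 0 []
  (pairs.foldl (pvMapStep cuts) (0, init, [])).2.2

-- ===== PORT B =====
-- closed-form cut for a gt char emitted at traceback column j
def pvCutAt (cuts : List (List (List Int))) (j : Nat) : List (List Int) :=
  if cuts.length = 0 then pvDefaultCut else cuts.getD (min (j-1) (cuts.length - 1)) []

-- dp fill that also records a direction code per cell (0=diag, 1=up, 2=left)
def pvFillB (g o : List Char) : List (List Int) × List (List Int) :=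
  let m := g.length
  let n := o.length
  let dp0 : List (List Int) := List.replicate (m+1) (List.replicate (n+1) 0)
  let dr0 : List (List Int) := List.replicate (m+1) (List.replicate (n+1) 0)
  let dp1 := (List.range (m+1)).foldl (fun t i => pvSet2 t i 0 (Int.ofNat i)) dp0
  let dp2 := (List.range (n+1)).foldl (fun t j => pvSet2 t 0 j (Int.ofNat j)) dp1
  (List.range m).foldl (fun s a =>
    (List.range n).foldl (fun s b =>
      let i := a+1
      let j := b+1
      if g.getD (i-1) ' ' = o.getD (j-1) ' ' then
        (pvSet2 s.1 i j (pvGet2 s.1 (i-1) (j-1)), pvSet2 s.2 i j 0)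
      else
        let v := 1 + min (min (pvGet2 s.1 (i-1) j) (pvGet2 s.1 i (j-1))) (pvGet2 s.1 (i-1) (j-1))
        (pvSet2 s.1 i j v,
         pvSet2 s.2 i j
           (if v = pvGet2 s.1 (i-1) (j-1) + 1 then 0
            else if v = pvGet2 s.1 (i-1) j + 1 then 1 else 2))) s) (dp2, dr0)

-- pointer walk emitting each gt char's cut directly (no align lists, no state machine)
def pvTbB (cuts : List (List (List Int))) (dirs : List (List Int)) :
    Nat → Nat → Nat → List (List (List Int)) → List (List (List Int))
  | 0, _, _, out => out
  | fuel+1, i, j, out =>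
    if 0 < i ∨ 0 < j then
      let d : Int := if 0 < i ∧ 0 < j then pvGet2 dirs i j else if j = 0 then 1 else 2
      if d = 0 then pvTbB cuts dirs fuel (i-1) (j-1) (out ++ [pvCutAt cuts j])
      else if d = 1 then pvTbB cuts dirs fuel (i-1) j (out ++ [pvCutAt cuts j])
      else pvTbB cuts dirs fuel i (j-1) out
    else out

def map_gt_to_cuts_py_alt (gt : String) (ocr : String) (cuts : List (List (List Int))) : List (List (List Int)) :=
  let g := gt.toList
  let o := ocr.toList
  let dirs := (pvFillB g o).2
  (pvTbB cuts dirs (g.length + o.length) g.length o.length []).reverse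

-- ===== PRECONDITION & SPEC =====
def Spec_map_gt_to_cuts_py (gt : String) (ocr : String) (cuts : List (List (List Int))) (out : List (List (List Int))) : Prop := out = map_gt_to_cuts_py_alt gt ocr cuts
instance (gt : String) (ocr : String) (cuts : List (List (List Int))) (out : List (List (List Int))) : Decidable (Spec_map_gt_to_cuts_py gt ocr cuts out) := by unfold Spec_map_gt_to_cuts_py; infer_instance

-- ===== CLAIM (what is proved, stated in full; the proofs are below) =====
def Claim_equal_map_gt_to_cuts_py : Prop := ∀ (gt : String) (ocr : String) (cuts : List (List (List Int))), Dom_map_gt_to_cuts_py gt ocr cuts → Spec_map_gt_to_cuts_py gt ocr cuts (map_gt_to_cuts_py gt ocr cuts)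

-- ===== LEMMAS AND PROOFS =====

-- the Levenshtein value function both tables realise
def pvL (g o : List Char) : Nat → Nat → Int
  | 0, j => (j : Int)
  | i+1, 0 => (i+1 : Int)
  | i+1, j+1 =>
      if g.getD i ' ' = o.getD j ' ' then pvL g o i j
      else 1 + min (min (pvL g o i (j+1)) (pvL g o (i+1) j)) (pvL g o i j)
termination_by i j => (i, j)

-- the direction A's backtrack chooses at an interior cell (0=diag, 1=up, 2=left)
def pvDirCode (g o : List Char) (i j : Nat) : Int :=
  if pvL g o i j = pvL g o (i-1) (j-1) + (if g.getD (i-1) ' ' = o.getD (j-1) ' ' then 0 else 1) then 0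
  else if pvL g o i j = pvL g o (i-1) j + 1 then 1 else 2

def pvDims (t : List (List Int)) (r c : Nat) : Prop :=
  t.length = r ∧ ∀ row ∈ t, row.length = c

lemma pvL_zero_left (g o : List Char) (j : Nat) : pvL g o 0 j = (j : Int) := by
  simp [pvL]

lemma pvL_zero_right (g o : List Char) (i : Nat) : pvL g o i 0 = (i : Int) := by
  cases i <;> simp [pvL]

lemma pv_dims_set2 {t : List (List Int)} {r c : Nat} (i j : Nat) (v : Int)
    (h : pvDims t r c) : pvDims (pvSet2 t i j v) r c := by
  obtain ⟨hl, hr⟩ := h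
  by_cases hi : i < t.length
  · refine ⟨by simp [pvSet2, hl], ?_⟩
    intro row hrow
    rw [pvSet2] at hrow
    rcases List.mem_or_eq_of_mem_set hrow with h1 | h1
    · exact hr _ h1
    · subst h1
      rw [List.length_set, List.getD_eq_getElem _ _ hi]
      exact hr _ (List.getElem_mem hi)
  · rw [pvSet2, List.set_eq_of_length_le (le_of_not_gt hi)]
    exact ⟨hl, hr⟩

lemma pv_get2_set2_self {t : List (List Int)} {r c : Nat} {i j : Nat} (v : Int)
    (h : pvDims t r c) (hi : i < r) (hj : j < c) :
    pvGet2 (pvSet2 t i j v) i j = v := by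
  have hi' : i < t.length := by rw [h.1]; exact hi
  have hrow : (t.getD i []).length = c := by
    rw [List.getD_eq_getElem _ _ hi']
    exact h.2 _ (List.getElem_mem hi')
  have h1 : (pvSet2 t i j v).getD i [] = (t.getD i []).set j v := by
    unfold pvSet2
    rw [List.getD_eq_getElem?_getD, List.getElem?_set, if_pos rfl, if_pos hi']
    rfl
  unfold pvGet2
  rw [h1, List.getD_eq_getElem _ _ (by rw [List.length_set, hrow]; exact hj),
    List.getElem_set_self]

lemma pv_get2_set2_ne {t : List (List Int)} {i j a b : Nat} (v : Int)
    (hne : ¬ (i = a ∧ j = b)) :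
    pvGet2 (pvSet2 t i j v) a b = pvGet2 t a b := by
  unfold pvGet2 pvSet2
  by_cases hia : i = a
  · subst hia
    have hjb : j ≠ b := fun hh => hne ⟨rfl, hh⟩
    by_cases hi : i < t.length
    · rw [List.getD_eq_getElem?_getD (l := t.set i _), List.getElem?_set, if_pos rfl, if_pos hi]
      simp only [Option.getD_some]
      rw [List.getD_eq_getElem?_getD (l := (t.getD i []).set j v), List.getElem?_set,
        if_neg hjb, ← List.getD_eq_getElem?_getD]
    · rw [List.set_eq_of_length_le (le_of_not_gt hi)]
  · rw [List.getD_eq_getElem?_getD (l := t.set i _), List.getElem?_set, if_neg hia,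
      ← List.getD_eq_getElem?_getD]


lemma pvL_succ (g o : List Char) (a b : Nat) :
    pvL g o (a+1) (b+1) = if g.getD a ' ' = o.getD b ' ' then pvL g o a b
      else 1 + min (min (pvL g o a (b+1)) (pvL g o (a+1) b)) (pvL g o a b) := by
  rw [pvL]

lemma pv_dims_replicate (m n : Nat) :
    pvDims (List.replicate (m+1) (List.replicate (n+1) (0:Int))) (m+1) (n+1) := by
  refine ⟨by simp, ?_⟩
  intro row h
  simp [List.eq_of_mem_replicate h]

-- the table after the two boundary-initialisation loops
def pvInit (m n : Nat) : List (List Int) :=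
  (List.range (n+1)).foldl (fun t j => pvSet2 t 0 j (Int.ofNat j))
    ((List.range (m+1)).foldl (fun t i => pvSet2 t i 0 (Int.ofNat i))
      (List.replicate (m+1) (List.replicate (n+1) 0)))

lemma pv_init1 (m n : Nat) : ∀ r, r ≤ m+1 →
    pvDims ((List.range r).foldl (fun t i => pvSet2 t i 0 (Int.ofNat i))
        (List.replicate (m+1) (List.replicate (n+1) 0))) (m+1) (n+1) ∧
    (∀ i, i < r → pvGet2 ((List.range r).foldl (fun t i => pvSet2 t i 0 (Int.ofNat i))
        (List.replicate (m+1) (List.replicate (n+1) 0))) i 0 = (i : Int)) := by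
  intro r
  induction r with
  | zero => exact fun _ => ⟨pv_dims_replicate m n, fun i h => absurd h (Nat.not_lt_zero i)⟩
  | succ r ih =>
    intro hr
    obtain ⟨hd, hc⟩ := ih (by omega)
    rw [List.range_succ, List.foldl_append, List.foldl_cons, List.foldl_nil]
    refine ⟨pv_dims_set2 _ _ _ hd, ?_⟩
    intro i hi
    by_cases hir : i = r
    · subst hir
      rw [pv_get2_set2_self _ hd (by omega) (by omega)]
      rfl
    · rw [pv_get2_set2_ne _ (fun hh => hir hh.1.symm)]
      exact hc i (by omega)

lemma pv_init2 (m n : Nat) (T : List (List Int))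
    (hd0 : pvDims T (m+1) (n+1)) (hc0 : ∀ i, i ≤ m → pvGet2 T i 0 = (i : Int)) :
    ∀ r, r ≤ n+1 →
      pvDims ((List.range r).foldl (fun t j => pvSet2 t 0 j (Int.ofNat j)) T) (m+1) (n+1) ∧
      (∀ i, i ≤ m → pvGet2 ((List.range r).foldl (fun t j => pvSet2 t 0 j (Int.ofNat j)) T) i 0 = (i : Int)) ∧
      (∀ j, j < r → pvGet2 ((List.range r).foldl (fun t j => pvSet2 t 0 j (Int.ofNat j)) T) 0 j = (j : Int)) := by
  intro r
  induction r with
  | zero => exact fun _ => ⟨hd0, hc0, fun j h => absurd h (Nat.not_lt_zero j)⟩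
  | succ r ih =>
    intro hr
    obtain ⟨hd, hcol, hrow⟩ := ih (by omega)
    rw [List.range_succ, List.foldl_append, List.foldl_cons, List.foldl_nil]
    refine ⟨pv_dims_set2 _ _ _ hd, ?_, ?_⟩
    · intro i hi
      by_cases h0 : i = 0 ∧ r = 0
      · obtain ⟨h1, h2⟩ := h0
        subst h1; subst h2
        rw [pv_get2_set2_self _ hd (by omega) (by omega)]
        rfl
      · rw [pv_get2_set2_ne _ (fun hh => h0 ⟨hh.1.symm, hh.2⟩)]
        exact hcol i hi
    · intro j hj
      by_cases hjr : j = r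
      · subst hjr
        rw [pv_get2_set2_self _ hd (by omega) (by omega)]
        rfl
      · rw [pv_get2_set2_ne _ (fun hh => hjr hh.2.symm)]
        exact hrow j (by omega)

lemma pvInit_spec (m n : Nat) :
    pvDims (pvInit m n) (m+1) (n+1) ∧
    (∀ i, i ≤ m → pvGet2 (pvInit m n) i 0 = (i : Int)) ∧
    (∀ j, j ≤ n → pvGet2 (pvInit m n) 0 j = (j : Int)) := by
  obtain ⟨hd0, hc0⟩ := pv_init1 m n (m+1) le_rfl
  obtain ⟨a, b, c⟩ := pv_init2 m n _ hd0 (fun i hi => hc0 i (by omega)) (n+1) le_rfl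
  exact ⟨a, b, fun j hj => c j (by omega)⟩

-- A's inner-loop body and loops, named for the proofs (definitionally the port's lambdas)
def pvValA (g o : List Char) (t : List (List Int)) (a b : Nat) : Int :=
  if g.getD a ' ' = o.getD b ' ' then pvGet2 t a b
  else 1 + min (min (pvGet2 t a (b+1)) (pvGet2 t (a+1) b)) (pvGet2 t a b)

def pvRowA (g o : List Char) (a : Nat) (T : List (List Int)) (c : Nat) : List (List Int) :=
  (List.range c).foldl (fun t b => pvSet2 t (a+1) (b+1) (pvValA g o t a b)) T

def pvFoldA (g o : List Char) (r : Nat) : List (List Int) :=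
  (List.range r).foldl (fun t a => pvRowA g o a t o.length) (pvInit g.length o.length)

lemma pv_rowA (g o : List Char) (r : Nat) (hr : r < g.length) (T : List (List Int))
    (hd : pvDims T (g.length+1) (o.length+1))
    (hc : ∀ i j, i ≤ g.length → j ≤ o.length → (j = 0 ∨ i ≤ r) → pvGet2 T i j = pvL g o i j) :
    ∀ c, c ≤ o.length →
      pvDims (pvRowA g o r T c) (g.length+1) (o.length+1) ∧
      (∀ i j, i ≤ g.length → j ≤ o.length → (j = 0 ∨ i ≤ r ∨ (i = r+1 ∧ 1 ≤ j ∧ j ≤ c)) →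
        pvGet2 (pvRowA g o r T c) i j = pvL g o i j) := by
  intro c
  induction c with
  | zero =>
    intro _
    refine ⟨hd, ?_⟩
    intro i j hi hj hcov
    refine hc i j hi hj ?_
    rcases hcov with h | h | h
    · exact Or.inl h
    · exact Or.inr h
    · omega
  | succ c ih =>
    intro hc1
    obtain ⟨hd', hc'⟩ := ih (by omega)
    have hstep : pvRowA g o r T (c+1) =
        pvSet2 (pvRowA g o r T c) (r+1) (c+1) (pvValA g o (pvRowA g o r T c) r c) := by
      rw [pvRowA, pvRowA, List.range_succ, List.foldl_append, List.foldl_cons, List.foldl_nil]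
    rw [hstep]
    have hval : pvValA g o (pvRowA g o r T c) r c = pvL g o (r+1) (c+1) := by
      rw [pvValA, hc' r c (by omega) (by omega) (Or.inr (Or.inl le_rfl)),
        hc' r (c+1) (by omega) (by omega) (Or.inr (Or.inl le_rfl)),
        hc' (r+1) c (by omega) (by omega) (by omega), pvL_succ]
    refine ⟨pv_dims_set2 _ _ _ hd', ?_⟩
    intro i j hi hj hcov
    by_cases hij : i = r+1 ∧ j = c+1
    · obtain ⟨h1, h2⟩ := hij
      subst h1; subst h2
      rw [pv_get2_set2_self _ hd' (by omega) (by omega), hval]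
    · rw [pv_get2_set2_ne _ (fun hh => hij ⟨hh.1.symm, hh.2.symm⟩)]
      exact hc' i j hi hj (by omega)

lemma pv_outerA (g o : List Char) : ∀ r, r ≤ g.length →
    pvDims (pvFoldA g o r) (g.length+1) (o.length+1) ∧
    (∀ i j, i ≤ g.length → j ≤ o.length → (j = 0 ∨ i ≤ r) →
      pvGet2 (pvFoldA g o r) i j = pvL g o i j) := by
  intro r
  induction r with
  | zero =>
    intro _
    obtain ⟨hd, hcol, hrow⟩ := pvInit_spec g.length o.length
    refine ⟨hd, ?_⟩
    intro i j hi hj hcov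
    rcases hcov with h | h
    · subst h
      rw [pvL_zero_right]
      exact hcol i hi
    · have h0 : i = 0 := by omega
      subst h0
      rw [pvL_zero_left]
      exact hrow j hj
  | succ r ih =>
    intro hr
    obtain ⟨hd, hc⟩ := ih (by omega)
    have hstep : pvFoldA g o (r+1) = pvRowA g o r (pvFoldA g o r) o.length := by
      rw [pvFoldA, pvFoldA, List.range_succ, List.foldl_append, List.foldl_cons, List.foldl_nil]
    rw [hstep]
    obtain ⟨hd', hc'⟩ := pv_rowA g o r (by omega) (pvFoldA g o r) hd hc o.length le_rfl
    exact ⟨hd', fun i j hi hj hcov => hc' i j hi hj (by omega)⟩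

-- characterisation of A's filled table
lemma pv_fillA_char (g o : List Char) :
    ∀ i j, i ≤ g.length → j ≤ o.length → pvGet2 (pvFillA g o) i j = pvL g o i j := by
  intro i j hi hj
  have h : pvFillA g o = pvFoldA g o g.length := rfl
  rw [h]
  exact (pv_outerA g o g.length le_rfl).2 i j hi hj (Or.inr hi)


-- B's loop body and loops, named for the proofs (definitionally the port's lambdas)
def pvStepB (g o : List Char) (s : List (List Int) × List (List Int)) (a b : Nat) :
    List (List Int) × List (List Int) :=
  if g.getD a ' ' = o.getD b ' ' then
    (pvSet2 s.1 (a+1) (b+1) (pvGet2 s.1 a b), pvSet2 s.2 (a+1) (b+1) 0)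
  else
    (pvSet2 s.1 (a+1) (b+1) (1 + min (min (pvGet2 s.1 a (b+1)) (pvGet2 s.1 (a+1) b)) (pvGet2 s.1 a b)),
     pvSet2 s.2 (a+1) (b+1)
       (if 1 + min (min (pvGet2 s.1 a (b+1)) (pvGet2 s.1 (a+1) b)) (pvGet2 s.1 a b) = pvGet2 s.1 a b + 1 then 0
        else if 1 + min (min (pvGet2 s.1 a (b+1)) (pvGet2 s.1 (a+1) b)) (pvGet2 s.1 a b) = pvGet2 s.1 a (b+1) + 1 then 1
        else 2))

def pvRowB (g o : List Char) (a : Nat) (S : List (List Int) × List (List Int)) (c : Nat) :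
    List (List Int) × List (List Int) :=
  (List.range c).foldl (fun s b => pvStepB g o s a b) S

def pvFoldB (g o : List Char) (r : Nat) : List (List Int) × List (List Int) :=
  (List.range r).foldl (fun s a => pvRowB g o a s o.length)
    (pvInit g.length o.length, List.replicate (g.length+1) (List.replicate (o.length+1) 0))

lemma pvDirCode_succ (g o : List Char) (a b : Nat) :
    pvDirCode g o (a+1) (b+1) =
      if g.getD a ' ' = o.getD b ' ' then 0
      else if pvL g o (a+1) (b+1) = pvL g o a b + 1 then 0
      else if pvL g o (a+1) (b+1) = pvL g o a (b+1) + 1 then 1 else 2 := by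
  unfold pvDirCode
  simp only [Nat.add_sub_cancel]
  by_cases h : g.getD a ' ' = o.getD b ' '
  · have hc : pvL g o (a+1) (b+1) = pvL g o a b + 0 := by rw [pvL_succ, if_pos h, add_zero]
    simp only [List.getD_eq_getElem?_getD] at h
    simp [h, hc]
  · simp only [List.getD_eq_getElem?_getD] at h
    simp [h]

lemma pv_rowB (g o : List Char) (r : Nat) (hr : r < g.length)
    (S : List (List Int) × List (List Int))
    (hd1 : pvDims S.1 (g.length+1) (o.length+1)) (hd2 : pvDims S.2 (g.length+1) (o.length+1))
    (hdp : ∀ i j, i ≤ g.length → j ≤ o.length → (j = 0 ∨ i ≤ r) → pvGet2 S.1 i j = pvL g o i j)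
    (hdir : ∀ i j, 1 ≤ i → i ≤ g.length → 1 ≤ j → j ≤ o.length → i ≤ r →
      pvGet2 S.2 i j = pvDirCode g o i j) :
    ∀ c, c ≤ o.length →
      pvDims (pvRowB g o r S c).1 (g.length+1) (o.length+1) ∧
      pvDims (pvRowB g o r S c).2 (g.length+1) (o.length+1) ∧
      (∀ i j, i ≤ g.length → j ≤ o.length → (j = 0 ∨ i ≤ r ∨ (i = r+1 ∧ 1 ≤ j ∧ j ≤ c)) →
        pvGet2 (pvRowB g o r S c).1 i j = pvL g o i j) ∧
      (∀ i j, 1 ≤ i → i ≤ g.length → 1 ≤ j → j ≤ o.length → (i ≤ r ∨ (i = r+1 ∧ j ≤ c)) →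
        pvGet2 (pvRowB g o r S c).2 i j = pvDirCode g o i j) := by
  intro c
  induction c with
  | zero =>
    intro _
    refine ⟨hd1, hd2, ?_, ?_⟩
    · intro i j hi hj hcov
      exact hdp i j hi hj (by omega)
    · intro i j h1 h2 h3 h4 hcov
      exact hdir i j h1 h2 h3 h4 (by omega)
  | succ c ih =>
    intro hc1
    obtain ⟨hd1', hd2', hdp', hdir'⟩ := ih (by omega)
    have hstep : pvRowB g o r S (c+1) = pvStepB g o (pvRowB g o r S c) r c := by
      rw [pvRowB, pvRowB, List.range_succ, List.foldl_append, List.foldl_cons, List.foldl_nil]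
    rw [hstep]
    have hvd : (pvStepB g o (pvRowB g o r S c) r c).1 =
        pvSet2 (pvRowB g o r S c).1 (r+1) (c+1) (pvL g o (r+1) (c+1)) ∧
        (pvStepB g o (pvRowB g o r S c) r c).2 =
        pvSet2 (pvRowB g o r S c).2 (r+1) (c+1) (pvDirCode g o (r+1) (c+1)) := by
      have e00 : pvGet2 (pvRowB g o r S c).1 r c = pvL g o r c :=
        hdp' r c (by omega) (by omega) (by omega)
      have e01 : pvGet2 (pvRowB g o r S c).1 r (c+1) = pvL g o r (c+1) :=
        hdp' r (c+1) (by omega) (by omega) (by omega)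
      have e10 : pvGet2 (pvRowB g o r S c).1 (r+1) c = pvL g o (r+1) c :=
        hdp' (r+1) c (by omega) (by omega) (by omega)
      unfold pvStepB
      by_cases h : g.getD r ' ' = o.getD c ' '
      · rw [if_pos h]
        constructor
        · rw [e00, pvL_succ, if_pos h]
        · rw [pvDirCode_succ, if_pos h]
      · rw [if_neg h]
        constructor
        · rw [e00, e01, e10, pvL_succ, if_neg h]
        · rw [e00, e01, e10, pvDirCode_succ, if_neg h,
            show pvL g o (r+1) (c+1) = 1 + min (min (pvL g o r (c+1)) (pvL g o (r+1) c)) (pvL g o r c) from by rw [pvL_succ, if_neg h]]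
    rw [hvd.1, hvd.2]
    refine ⟨pv_dims_set2 _ _ _ hd1', pv_dims_set2 _ _ _ hd2', ?_, ?_⟩
    · intro i j hi hj hcov
      by_cases hij : i = r+1 ∧ j = c+1
      · obtain ⟨ha, hb⟩ := hij
        subst ha; subst hb
        rw [pv_get2_set2_self _ hd1' (by omega) (by omega)]
      · rw [pv_get2_set2_ne _ (fun hh => hij ⟨hh.1.symm, hh.2.symm⟩)]
        exact hdp' i j hi hj (by omega)
    · intro i j h1 h2 h3 h4 hcov
      by_cases hij : i = r+1 ∧ j = c+1
      · obtain ⟨ha, hb⟩ := hij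
        subst ha; subst hb
        rw [pv_get2_set2_self _ hd2' (by omega) (by omega)]
      · rw [pv_get2_set2_ne _ (fun hh => hij ⟨hh.1.symm, hh.2.symm⟩)]
        exact hdir' i j h1 h2 h3 h4 (by omega)

lemma pv_outerB (g o : List Char) : ∀ r, r ≤ g.length →
    pvDims (pvFoldB g o r).1 (g.length+1) (o.length+1) ∧
    pvDims (pvFoldB g o r).2 (g.length+1) (o.length+1) ∧
    (∀ i j, i ≤ g.length → j ≤ o.length → (j = 0 ∨ i ≤ r) →
      pvGet2 (pvFoldB g o r).1 i j = pvL g o i j) ∧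
    (∀ i j, 1 ≤ i → i ≤ g.length → 1 ≤ j → j ≤ o.length → i ≤ r →
      pvGet2 (pvFoldB g o r).2 i j = pvDirCode g o i j) := by
  intro r
  induction r with
  | zero =>
    intro _
    obtain ⟨hd, hcol, hrow⟩ := pvInit_spec g.length o.length
    refine ⟨hd, pv_dims_replicate _ _, ?_, ?_⟩
    · intro i j hi hj hcov
      rcases hcov with h | h
      · subst h
        rw [pvL_zero_right]
        exact hcol i hi
      · have h0 : i = 0 := by omega
        subst h0
        rw [pvL_zero_left]
        exact hrow j hj
    · intro i j h1 _ _ _ h5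
      omega
  | succ r ih =>
    intro hr
    obtain ⟨hd1, hd2, hdp, hdir⟩ := ih (by omega)
    have hstep : pvFoldB g o (r+1) = pvRowB g o r (pvFoldB g o r) o.length := by
      rw [pvFoldB, pvFoldB, List.range_succ, List.foldl_append, List.foldl_cons, List.foldl_nil]
    rw [hstep]
    obtain ⟨a, b, cdp, cdir⟩ := pv_rowB g o r (by omega) (pvFoldB g o r) hd1 hd2 hdp hdir o.length le_rfl
    refine ⟨a, b, fun i j hi hj hcov => cdp i j hi hj (by omega),
      fun i j h1 h2 h3 h4 h5 => cdir i j h1 h2 h3 h4 (by omega)⟩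

-- characterisation of B's direction table
lemma pv_fillB_dir (g o : List Char) :
    ∀ i j, 1 ≤ i → i ≤ g.length → 1 ≤ j → j ≤ o.length →
      pvGet2 (pvFillB g o).2 i j = pvDirCode g o i j := by
  intro i j h1 h2 h3 h4
  have h : pvFillB g o = pvFoldB g o g.length := rfl
  rw [h]
  exact (pv_outerB g o g.length le_rfl).2.2.2 i j h1 h2 h3 h4 h2

lemma pvTbA_acc (g o : List Char) (dp : List (List Int)) :
    ∀ fuel i j ag ao, pvTbA g o dp fuel i j ag ao =
      (ag ++ (pvTbA g o dp fuel i j [] []).1, ao ++ (pvTbA g o dp fuel i j [] []).2) := by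
  intro fuel
  induction fuel with
  | zero => intro i j ag ao; simp [pvTbA]
  | succ f ih =>
    intro i j ag ao
    simp only [pvTbA]
    split_ifs <;> (try simp only [List.nil_append]) <;>
      first
      | rfl
      | (rw [ih (i-1) (j-1) (ag ++ [some (g.getD (i-1) ' ')]) (ao ++ [some (o.getD (j-1) ' ')]),
            ih (i-1) (j-1) [some (g.getD (i-1) ' ')] [some (o.getD (j-1) ' ')]]
         simp)
      | (rw [ih (i-1) j (ag ++ [some (g.getD (i-1) ' ')]) (ao ++ [none]),
            ih (i-1) j [some (g.getD (i-1) ' ')] [none]]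
         simp)
      | (rw [ih i (j-1) (ag ++ [none]) (ao ++ [some (o.getD (j-1) ' ')]),
            ih i (j-1) [none] [some (o.getD (j-1) ' ')]]
         simp)
      | simp

lemma pvTbA_len (g o : List Char) (dp : List (List Int)) :
    ∀ fuel i j, (pvTbA g o dp fuel i j [] []).1.length = (pvTbA g o dp fuel i j [] []).2.length := by
  intro fuel
  induction fuel with
  | zero => intro i j; simp [pvTbA]
  | succ f ih =>
    intro i j
    simp only [pvTbA]
    split_ifs <;>
      first
      | rfl
      | (rw [pvTbA_acc g o dp f (i-1) (j-1)]; simp [ih])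
      | (rw [pvTbA_acc g o dp f (i-1) j]; simp [ih])
      | (rw [pvTbA_acc g o dp f i (j-1)]; simp [ih])

lemma pvTbB_acc (cuts : List (List (List Int))) (dirs : List (List Int)) :
    ∀ fuel i j out, pvTbB cuts dirs fuel i j out = out ++ pvTbB cuts dirs fuel i j [] := by
  intro fuel
  induction fuel with
  | zero => intro i j out; simp [pvTbB]
  | succ f ih =>
    intro i j out
    simp only [pvTbB]
    split_ifs <;> (try simp only [List.nil_append]) <;>
      first
      | rfl
      | (rw [ih (i-1) (j-1) (out ++ [pvCutAt cuts j]), ih (i-1) (j-1) [pvCutAt cuts j]]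
         simp)
      | (rw [ih (i-1) j (out ++ [pvCutAt cuts j]), ih (i-1) j [pvCutAt cuts j]]
         simp)
      | (rw [ih i (j-1) out])
      | simp

lemma pv_cut_step (cuts : List (List (List Int))) (j : Nat) (hj : 1 ≤ j) :
    (if j - 1 < cuts.length then cuts.getD (j-1) [] else pvCutAt cuts (j-1)) = pvCutAt cuts j := by
  by_cases k0 : cuts.length = 0
  · simp [pvCutAt, k0]
  · by_cases hlt : j - 1 < cuts.length
    · have hm : min (j-1) (cuts.length - 1) = j - 1 := by omega
      simp [pvCutAt, k0, hlt, hm]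
    · have h1 : min (j-1-1) (cuts.length - 1) = cuts.length - 1 := by omega
      have h2 : min (j-1) (cuts.length - 1) = cuts.length - 1 := by omega
      simp [pvCutAt, k0, hlt, h1, h2]

-- the crux: A's align-then-map pass equals B's direct pointer walk
lemma pv_main (g o : List Char) (cuts : List (List (List Int))) (dp dirs : List (List Int))
    (hdp : ∀ i j, i ≤ g.length → j ≤ o.length → pvGet2 dp i j = pvL g o i j)
    (hdir : ∀ i j, 1 ≤ i → i ≤ g.length → 1 ≤ j → j ≤ o.length → pvGet2 dirs i j = pvDirCode g o i j) :
    ∀ fuel i j, i ≤ g.length → j ≤ o.length → i + j ≤ fuel →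
      (List.zip (pvTbA g o dp fuel i j [] []).1.reverse (pvTbA g o dp fuel i j [] []).2.reverse).foldl
          (pvMapStep cuts) (0, pvCutAt cuts 0, [])
        = (j, pvCutAt cuts j, (pvTbB cuts dirs fuel i j []).reverse) := by
  intro fuel
  induction fuel with
  | zero =>
    intro i j hi hj hf
    have hi0 : i = 0 := by omega
    have hj0 : j = 0 := by omega
    subst hi0; subst hj0
    simp [pvTbA, pvTbB]
  | succ f ih =>
    intro i j hi hj hf
    by_cases h00 : i = 0 ∧ j = 0
    · obtain ⟨ha, hb⟩ := h00
      subst ha; subst hb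
      simp [pvTbA, pvTbB]
    have h0 : 0 < i ∨ 0 < j := by omega
    by_cases hipos : 0 < i
    · by_cases hjpos : 0 < j
      · -- interior cell: branch on the direction code
        have e1 : pvGet2 dp i j = pvL g o i j := hdp i j hi hj
        have e2 : pvGet2 dp (i-1) (j-1) = pvL g o (i-1) (j-1) := hdp (i-1) (j-1) (by omega) (by omega)
        have e3 : pvGet2 dp (i-1) j = pvL g o (i-1) j := hdp (i-1) j (by omega) hj
        have ed : pvGet2 dirs i j = pvDirCode g o i j := hdir i j hipos hi hjpos hj
        have hL : (pvTbA g o dp f (i-1) (j-1) [] []).1.reverse.length =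
            (pvTbA g o dp f (i-1) (j-1) [] []).2.reverse.length := by
          simp [pvTbA_len g o dp f (i-1) (j-1)]
        have hL2 : (pvTbA g o dp f (i-1) j [] []).1.reverse.length =
            (pvTbA g o dp f (i-1) j [] []).2.reverse.length := by
          simp [pvTbA_len g o dp f (i-1) j]
        have hL3 : (pvTbA g o dp f i (j-1) [] []).1.reverse.length =
            (pvTbA g o dp f i (j-1) [] []).2.reverse.length := by
          simp [pvTbA_len g o dp f i (j-1)]
        have hjj : j - 1 + 1 = j := by omega
        by_cases hc0 : pvL g o i j = pvL g o (i-1) (j-1) + (if g.getD (i-1) ' ' = o.getD (j-1) ' ' then 0 else 1)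
        · -- diagonal step
          have hcnd : 0 < i ∧ 0 < j ∧ pvGet2 dp i j = pvGet2 dp (i-1) (j-1) +
              (if g.getD (i-1) ' ' = o.getD (j-1) ' ' then 0 else 1) :=
            ⟨hipos, hjpos, by rw [e1, e2]; exact hc0⟩
          have hA : pvTbA g o dp (f+1) i j [] [] =
              pvTbA g o dp f (i-1) (j-1) [some (g.getD (i-1) ' ')] [some (o.getD (j-1) ' ')] := by
            simp only [pvTbA]
            rw [if_pos h0, if_pos hcnd]
            rfl
          have hdB : pvDirCode g o i j = 0 := by
            unfold pvDirCode
            rw [if_pos hc0]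
          have hB : pvTbB cuts dirs (f+1) i j [] = pvTbB cuts dirs f (i-1) (j-1) [pvCutAt cuts j] := by
            simp only [pvTbB]
            rw [if_pos h0, if_pos (show 0 < i ∧ 0 < j from ⟨hipos, hjpos⟩), ed, hdB, if_pos rfl]
            simp
          rw [hA, hB, pvTbA_acc g o dp f (i-1) (j-1), pvTbB_acc cuts dirs f (i-1) (j-1)]
          simp only [List.reverse_append, List.reverse_cons, List.reverse_nil, List.nil_append]
          rw [List.zip_append hL, List.foldl_append,
            ih (i-1) (j-1) (by omega) (by omega) (by omega)]
          simp only [List.zip_cons_cons, List.zip_nil_right, List.foldl_cons, List.foldl_nil]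
          simp only [pvMapStep]
          rw [pv_cut_step cuts j hjpos, hjj]
        · by_cases hc1 : pvL g o i j = pvL g o (i-1) j + 1
          · -- up step
            have hnd : ¬ (0 < i ∧ 0 < j ∧ pvGet2 dp i j = pvGet2 dp (i-1) (j-1) +
                (if g.getD (i-1) ' ' = o.getD (j-1) ' ' then 0 else 1)) := by
              intro h
              have hh := h.2.2
              rw [e1, e2] at hh
              exact hc0 hh
            have hcnd : 0 < i ∧ pvGet2 dp i j = pvGet2 dp (i-1) j + 1 :=
              ⟨hipos, by rw [e1, e3]; exact hc1⟩
            have hA : pvTbA g o dp (f+1) i j [] [] =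
                pvTbA g o dp f (i-1) j [some (g.getD (i-1) ' ')] [none] := by
              simp only [pvTbA]
              rw [if_pos h0, if_neg hnd, if_pos hcnd]
              rfl
            have hdB : pvDirCode g o i j = 1 := by
              unfold pvDirCode
              rw [if_neg hc0, if_pos hc1]
            have hB : pvTbB cuts dirs (f+1) i j [] = pvTbB cuts dirs f (i-1) j [pvCutAt cuts j] := by
              simp only [pvTbB]
              rw [if_pos h0, if_pos (show 0 < i ∧ 0 < j from ⟨hipos, hjpos⟩), ed, hdB]
              simp
            rw [hA, hB, pvTbA_acc g o dp f (i-1) j, pvTbB_acc cuts dirs f (i-1) j]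
            simp only [List.reverse_append, List.reverse_cons, List.reverse_nil, List.nil_append]
            rw [List.zip_append hL2, List.foldl_append,
              ih (i-1) j (by omega) hj (by omega)]
            simp only [List.zip_cons_cons, List.zip_nil_right, List.foldl_cons, List.foldl_nil]
            simp only [pvMapStep]
          · -- left step
            have hnd : ¬ (0 < i ∧ 0 < j ∧ pvGet2 dp i j = pvGet2 dp (i-1) (j-1) +
                (if g.getD (i-1) ' ' = o.getD (j-1) ' ' then 0 else 1)) := by
              intro h
              have hh := h.2.2
              rw [e1, e2] at hh
              exact hc0 hh
            have hnd2 : ¬ (0 < i ∧ pvGet2 dp i j = pvGet2 dp (i-1) j + 1) := by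
              intro h
              have hh := h.2
              rw [e1, e3] at hh
              exact hc1 hh
            have hA : pvTbA g o dp (f+1) i j [] [] =
                pvTbA g o dp f i (j-1) [none] [some (o.getD (j-1) ' ')] := by
              simp only [pvTbA]
              rw [if_pos h0, if_neg hnd, if_neg hnd2]
              rfl
            have hdB : pvDirCode g o i j = 2 := by
              unfold pvDirCode
              rw [if_neg hc0, if_neg hc1]
            have hB : pvTbB cuts dirs (f+1) i j [] = pvTbB cuts dirs f i (j-1) [] := by
              simp only [pvTbB]
              rw [if_pos h0, if_pos (show 0 < i ∧ 0 < j from ⟨hipos, hjpos⟩), ed, hdB]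
              simp
            rw [hA, hB, pvTbA_acc g o dp f i (j-1)]
            simp only [List.reverse_append, List.reverse_cons, List.reverse_nil, List.nil_append]
            rw [List.zip_append hL3, List.foldl_append,
              ih i (j-1) hi (by omega) (by omega)]
            simp only [List.zip_cons_cons, List.zip_nil_right, List.foldl_cons, List.foldl_nil]
            simp only [pvMapStep]
            rw [pv_cut_step cuts j hjpos, hjj]
      · -- j = 0: forced up step
        have hj0 : j = 0 := by omega
        subst hj0
        have e1 : pvGet2 dp i 0 = pvL g o i 0 := hdp i 0 hi (by omega)
        have e3 : pvGet2 dp (i-1) 0 = pvL g o (i-1) 0 := hdp (i-1) 0 (by omega) (by omega)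
        have hL2 : (pvTbA g o dp f (i-1) 0 [] []).1.reverse.length =
            (pvTbA g o dp f (i-1) 0 [] []).2.reverse.length := by
          simp [pvTbA_len g o dp f (i-1) 0]
        have hnd : ¬ (0 < i ∧ 0 < 0 ∧ pvGet2 dp i 0 = pvGet2 dp (i-1) (0-1) +
            (if g.getD (i-1) ' ' = o.getD (0-1) ' ' then 0 else 1)) := by
          intro h
          exact absurd h.2.1 (by omega)
        have hcnd : 0 < i ∧ pvGet2 dp i 0 = pvGet2 dp (i-1) 0 + 1 := by
          refine ⟨hipos, ?_⟩
          rw [e1, e3, pvL_zero_right, pvL_zero_right]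
          omega
        have hA : pvTbA g o dp (f+1) i 0 [] [] =
            pvTbA g o dp f (i-1) 0 [some (g.getD (i-1) ' ')] [none] := by
          simp only [pvTbA]
          rw [if_pos h0, if_neg hnd, if_pos hcnd]
          rfl
        have hB : pvTbB cuts dirs (f+1) i 0 [] = pvTbB cuts dirs f (i-1) 0 [pvCutAt cuts 0] := by
          simp only [pvTbB]
          rw [if_pos h0, if_neg (show ¬(0 < i ∧ 0 < 0) by omega)]
          simp
        rw [hA, hB, pvTbA_acc g o dp f (i-1) 0, pvTbB_acc cuts dirs f (i-1) 0]
        simp only [List.reverse_append, List.reverse_cons, List.reverse_nil, List.nil_append]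
        rw [List.zip_append hL2, List.foldl_append,
          ih (i-1) 0 (by omega) (by omega) (by omega)]
        simp only [List.zip_cons_cons, List.zip_nil_right, List.foldl_cons, List.foldl_nil]
        simp only [pvMapStep]
    · -- i = 0, j > 0: forced left step
      have hjpos : 0 < j := by omega
      have hjj : j - 1 + 1 = j := by omega
      have hL3 : (pvTbA g o dp f 0 (j-1) [] []).1.reverse.length =
          (pvTbA g o dp f 0 (j-1) [] []).2.reverse.length := by
        simp [pvTbA_len g o dp f 0 (j-1)]
      have hi0 : i = 0 := by omega
      subst hi0
      have hA : pvTbA g o dp (f+1) 0 j [] [] =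
          pvTbA g o dp f 0 (j-1) [none] [some (o.getD (j-1) ' ')] := by
        simp only [pvTbA]
        rw [if_pos h0, if_neg (fun h => absurd h.1 (by omega)),
          if_neg (fun h => absurd h.1 (by omega))]
        rfl
      have hB : pvTbB cuts dirs (f+1) 0 j [] = pvTbB cuts dirs f 0 (j-1) [] := by
        simp only [pvTbB]
        rw [if_pos h0, if_neg (show ¬(0 < (0:Nat) ∧ 0 < j) by omega),
          if_neg (show ¬(j = 0) by omega)]
        simp
      rw [hA, hB, pvTbA_acc g o dp f 0 (j-1)]
      simp only [List.reverse_append, List.reverse_cons, List.reverse_nil, List.nil_append]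
      rw [List.zip_append hL3, List.foldl_append,
        ih 0 (j-1) (by omega) (by omega) (by omega)]
      simp only [List.zip_cons_cons, List.zip_nil_right, List.foldl_cons, List.foldl_nil]
      simp only [pvMapStep]
      rw [pv_cut_step cuts j hjpos, hjj]
lemma pv_init_eq (cuts : List (List (List Int))) :
    (if cuts.isEmpty then pvDefaultCut else cuts.getD 0 []) = pvCutAt cuts 0 := by
  cases cuts <;> simp [pvCutAt, pvDefaultCut]

-- ===== VERDICT (by name: the statement is the Claim_ definition above) =====
theorem map_gt_to_cuts_py_spec : Claim_equal_map_gt_to_cuts_py := by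
  intro gt ocr cuts _
  unfold Spec_map_gt_to_cuts_py map_gt_to_cuts_py map_gt_to_cuts_py_alt
  have h := pv_main gt.toList ocr.toList cuts (pvFillA gt.toList ocr.toList)
      ((pvFillB gt.toList ocr.toList).2)
      (pv_fillA_char gt.toList ocr.toList) (pv_fillB_dir gt.toList ocr.toList)
      (gt.toList.length + ocr.toList.length) gt.toList.length ocr.toList.length
      le_rfl le_rfl le_rfl
  simp only [pv_init_eq]
  rw [h]
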